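-- pv_equiv track=rewrite | github.com/zhmu/x86box | test/alu.py | my_sar
-- ===== SOURCE A (Python) =====
-- CF = (1 << 0)
--
-- PF = (1 << 2)
--
-- ZF = (1 << 6)
--
-- SF = (1 << 7)
--
-- def must_set_zf(v):
--     return v == 0
--
-- def must_set_sf(v):
--     return (v & 0x80) != 0
--
-- def must_set_pf(v):
--     num_1 = 0
--     for n in range(0, 8):
--         if (v & (1 << n)): num_1 += 1
--     return (num_1 & 1) == 0
--
-- def set_flag(fl, on, flag):
--     if on:
--         fl = fl | flag
--     else:
--         fl = fl & ~flag
--     return fl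
--
-- def set_flags_pzs(v, fl):
--     fl = set_flag(fl, must_set_zf(v), ZF)
--     fl = set_flag(fl, must_set_sf(v), SF)
--     fl = set_flag(fl, must_set_pf(v), PF)
--     return fl
--
-- def my_sar(a, cnt, initial_flags):
--     cnt = cnt & 0x1f
--     if cnt == 0:
--         # no flags changed
--         return (a, initial_flags)
--
--     new_fl = initial_flags & ~CF
--
--     res = a
--     for _ in range(0, cnt):
--         new_fl = set_flag(new_fl, res & 1, CF)
--         expand = 0x80 if res & 0x80 else 0
--         res = expand | (res >> 1)
--
--     # shifts of 1 always clear OF - otherwise OF is undefined but it always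
--     # seems to be cleared...
--     return (res, set_flags_pzs(res, new_fl))
-- ===== SOURCE B (Python) =====
-- CF = (1 << 0)
-- PF = (1 << 2)
-- ZF = (1 << 6)
-- SF = (1 << 7)
--
-- def my_sar(a, cnt, initial_flags):
--     cnt &= 0x1f
--     if cnt == 0:
--         return (a, initial_flags)
--     # bit p of s = OR of bits max(0, p-31)..p of (a >> 7): parallel prefix-OR smear
--     s = a >> 7
--     s |= s << 1
--     s |= s << 2
--     s |= s << 4
--     s |= s << 8
--     s |= s << 16
--     res = (a >> cnt) | (((s << 7) >> cnt) & 0xff)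
--     k = cnt - 1
--     cf = (a >> k) & 1 if k < 8 else (s >> (k - 7)) & 1
--     fl = initial_flags | CF if cf else initial_flags & ~CF
--     fl = fl | ZF if res == 0 else fl & ~ZF
--     fl = fl | SF if res & 0x80 else fl & ~SF
--     fl = fl | PF if (res & 0xff).bit_count() % 2 == 0 else fl & ~PF
--     return (res, fl)
-- ===== Notes on version B (the rewrite author's own statement) =====
-- stated objective: alternative
-- what changed: A shifts one bit per loop iteration (cnt times), updating CF and re-filling the sign bit each step; B computes the result in closed form with a single arithmetic shift plus a parallel prefix-OR bit smear that supplies the sign fill, reads CF directly from the right bit, and uses bit_count() for parity instead of A's per-bit counting loop.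
import Mathlib
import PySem

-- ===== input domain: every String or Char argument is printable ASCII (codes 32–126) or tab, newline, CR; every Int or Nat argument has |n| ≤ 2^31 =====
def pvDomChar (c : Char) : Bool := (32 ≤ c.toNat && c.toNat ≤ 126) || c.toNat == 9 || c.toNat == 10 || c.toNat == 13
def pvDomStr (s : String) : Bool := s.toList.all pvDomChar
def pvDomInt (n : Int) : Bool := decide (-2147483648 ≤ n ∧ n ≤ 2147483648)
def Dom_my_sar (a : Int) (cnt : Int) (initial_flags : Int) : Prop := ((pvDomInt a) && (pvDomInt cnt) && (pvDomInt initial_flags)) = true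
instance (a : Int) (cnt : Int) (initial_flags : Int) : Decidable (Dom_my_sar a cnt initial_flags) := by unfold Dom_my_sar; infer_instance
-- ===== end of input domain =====

-- B replaces A's per-step shift/flag loop by closed-form shifts plus a parallel prefix-OR
-- bit smear that produces the arithmetic sign fill and the carry in O(1) (objective: alternative).

-- ===== PORT A =====
-- helpers of A, transliterated

def pv_set_flag (fl : Int) (on : Bool) (flag : Int) : Int :=
  if on then PySem.Int.bor fl flag else PySem.Int.band fl (Int.not flag)

def pv_must_set_zf (v : Int) : Bool := v == 0

def pv_must_set_sf (v : Int) : Bool := PySem.Int.band v 0x80 != 0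

-- `1 << n` : n ranges over pyRange 0 8, all nonnegative, so `.toNat` is exact here
def pv_must_set_pf (v : Int) : Bool :=
  let num_1 : Int := (PySem.List.pyRange 0 8 1).foldl
    (fun num_1 n => if PySem.Int.band v ((1 : Int) <<< n.toNat) != 0 then num_1 + 1 else num_1) 0
  PySem.Int.band num_1 1 == 0

def pv_set_flags_pzs (v : Int) (fl : Int) : Int :=
  let fl := pv_set_flag fl (pv_must_set_zf v) 64
  let fl := pv_set_flag fl (pv_must_set_sf v) 128
  pv_set_flag fl (pv_must_set_pf v) 4

def my_sar (a : Int) (cnt : Int) (initial_flags : Int) : Int × Int :=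
  let cnt := PySem.Int.band cnt 0x1f
  if cnt == 0 then (a, initial_flags)
  else
    let new_fl := PySem.Int.band initial_flags (Int.not 1)
    -- `res >> 1` : Python's shift of the running value by the nonnegative literal 1
    let st := (PySem.List.pyRange 0 cnt 1).foldl
      (fun (st : Int × Int) _ =>
        let new_fl := pv_set_flag st.2 (PySem.Int.band st.1 1 != 0) 1
        let expand : Int := if PySem.Int.band st.1 0x80 != 0 then 0x80 else 0
        (PySem.Int.bor expand (st.1 >>> (1 : Nat)), new_fl))
      (a, new_fl)
    (st.1, pv_set_flags_pzs st.1 st.2)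

-- ===== PORT B =====
def my_sar_alt (a : Int) (cnt : Int) (initial_flags : Int) : Int × Int :=
  let cnt := PySem.Int.band cnt 0x1f
  if cnt == 0 then (a, initial_flags)
  else
    -- bit p of s = OR of bits max(0, p-31)..p of (a >> 7): parallel prefix-OR smear
    let s := a >>> (7 : Nat)
    let s := PySem.Int.bor s (s <<< (1 : Nat))
    let s := PySem.Int.bor s (s <<< (2 : Nat))
    let s := PySem.Int.bor s (s <<< (4 : Nat))
    let s := PySem.Int.bor s (s <<< (8 : Nat))
    let s := PySem.Int.bor s (s <<< (16 : Nat))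
    -- shifts by cnt, cnt-1, cnt-8 : all nonnegative here, so `.toNat` is exact
    let res := PySem.Int.bor (a >>> cnt.toNat)
      (PySem.Int.band ((s <<< (7 : Nat)) >>> cnt.toNat) 0xff)
    let k := cnt - 1
    let cf : Int := if k < 8 then PySem.Int.band (a >>> k.toNat) 1
                    else PySem.Int.band (s >>> (k - 7).toNat) 1
    let fl := if cf != 0 then PySem.Int.bor initial_flags 1
              else PySem.Int.band initial_flags (Int.not 1)
    let fl := if res == 0 then PySem.Int.bor fl 64 else PySem.Int.band fl (Int.not 64)
    let fl := if PySem.Int.band res 0x80 != 0 then PySem.Int.bor fl 128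
              else PySem.Int.band fl (Int.not 128)
    let fl := if PySem.Int.bitCount (PySem.Int.band res 0xff) % 2 == 0 then PySem.Int.bor fl 4
              else PySem.Int.band fl (Int.not 4)
    (res, fl)

-- ===== PRECONDITION & SPEC =====
def Spec_my_sar (a : Int) (cnt : Int) (initial_flags : Int) (out : Int × Int) : Prop := out = my_sar_alt a cnt initial_flags
instance (a : Int) (cnt : Int) (initial_flags : Int) (out : Int × Int) : Decidable (Spec_my_sar a cnt initial_flags out) := by unfold Spec_my_sar; infer_instance

-- ===== CLAIM (what is proved, stated in full; the proofs are below) =====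
def Claim_equal_my_sar : Prop := ∀ (a : Int) (cnt : Int) (initial_flags : Int), Dom_my_sar a cnt initial_flags → Spec_my_sar a cnt initial_flags (my_sar a cnt initial_flags)

-- ===== LEMMAS AND PROOFS =====

-- Nat bit facts

theorem land_add_ldiff (m n : Nat) : (m &&& n) + Nat.ldiff m n = m := by
  induction m using Nat.binaryRec generalizing n with
  | zero => simp [Nat.ldiff]
  | bit b m ih =>
    rw [← Nat.bit_testBit_zero_shiftRight_one n, Nat.land_bit, Nat.ldiff_bit,
        Nat.bit_val, Nat.bit_val, Nat.bit_val]
    have := ih (n >>> 1)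
    cases b <;> cases hb : n.testBit 0 <;> simp <;> omega

theorem sub_land (m n : Nat) : m - (m &&& n) = Nat.ldiff m n := by
  have := land_add_ldiff m n; omega

theorem tb_mul_pow_sub_one (n k i : Nat) :
    ((n + 1) * 2 ^ k - 1).testBit i = (decide (i < k) || n.testBit (i - k)) := by
  induction k generalizing i with
  | zero => simp
  | succ k ih =>
    have h1 : (n + 1) * 2 ^ (k + 1) - 1 = Nat.bit true ((n + 1) * 2 ^ k - 1) := by
      have h : 1 ≤ (n+1) * 2^k := Nat.one_le_iff_ne_zero.mpr (by positivity)
      have h3 : (n + 1) * 2 ^ (k+1) = 2 * ((n+1) * 2^k) := by ring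
      rw [Nat.bit_val, h3]
      generalize hM : (n + 1) * 2 ^ k = M at h ⊢
      simp only [Bool.toNat_true]
      omega
    rw [h1]
    cases i with
    | zero => simp
    | succ i =>
      rw [Nat.testBit_bit_succ, ih]
      rcases Nat.lt_or_ge i k with h | h
      · simp [h]
      · have : ¬ (i + 1 < k + 1) := by omega
        simp [this, show ¬ i < k from by omega, show i + 1 - (k+1) = i - k from by omega]

-- Int bit toolkit

theorem int_ext {x y : Int} (h : ∀ i, x.testBit i = y.testBit i) : x = y := by
  have big : ∀ m n : Nat, m.testBit (m + n) = false := fun m n =>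
    Nat.testBit_lt_two_pow (lt_of_lt_of_le Nat.lt_two_pow_self (Nat.pow_le_pow_right (by norm_num) (by omega)))
  cases x with
  | ofNat m => cases y with
    | ofNat n => exact congrArg _ (Nat.eq_of_testBit_eq fun i => h i)
    | negSucc n =>
      exfalso
      have := h (m + n)
      simp only [Int.testBit] at this
      rw [big m n, show m + n = n + m from by omega, big n m] at this
      simp at this
  | negSucc m => cases y with
    | ofNat n =>
      exfalso
      have := h (m + n)
      simp only [Int.testBit] at this
      rw [big m n, show m + n = n + m from by omega, big n m] at this
      simp at this
    | negSucc n =>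
      have : m = n := Nat.eq_of_testBit_eq fun i => by
        have := h i; simp only [Int.testBit] at this
        cases hm : m.testBit i <;> cases hn : n.testBit i <;> simp [hm, hn] at this ⊢
      rw [this]

theorem pos_ofNat (m : Nat) : (0 : Int) ≤ Int.ofNat m := Int.natCast_nonneg m
theorem npos_negSucc (m : Nat) : ¬ (0:Int) ≤ Int.negSucc m := by
  simp [Int.negSucc_eq]; omega
theorem toNat_negpart (n : Nat) : (-(Int.negSucc n) - 1).toNat = n := by
  simp [Int.negSucc_eq]
theorem toNat_ofNat' (n : Nat) : (Int.ofNat n).toNat = n := rfl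
theorem negSucc_form (n : Nat) : -((n:Int)) - 1 = Int.negSucc n := by
  rw [Int.negSucc_eq]; ring

theorem tb_band (a b : Int) (i : Nat) :
    (PySem.Int.band a b).testBit i = (a.testBit i && b.testBit i) := by
  unfold PySem.Int.band
  cases a with
  | ofNat m =>
    cases b with
    | ofNat n => simp [Int.testBit]
    | negSucc n =>
      simp only [pos_ofNat, npos_negSucc, if_true, if_false, toNat_negpart, toNat_ofNat']
      rw [sub_land]
      simp [Int.testBit, Nat.testBit_ldiff]
  | negSucc m =>
    cases b with
    | ofNat n =>
      simp only [pos_ofNat, npos_negSucc, if_true, if_false, toNat_negpart, toNat_ofNat']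
      rw [sub_land]
      simp [Int.testBit, Nat.testBit_ldiff, Bool.and_comm]
    | negSucc n =>
      simp only [npos_negSucc, if_false, toNat_negpart, negSucc_form]
      simp [Int.testBit]

theorem tb_bor (a b : Int) (i : Nat) :
    (PySem.Int.bor a b).testBit i = (a.testBit i || b.testBit i) := by
  unfold PySem.Int.bor
  cases a with
  | ofNat m =>
    cases b with
    | ofNat n => simp [Int.testBit]
    | negSucc n =>
      simp only [pos_ofNat, npos_negSucc, if_true, if_false, toNat_negpart, toNat_ofNat']
      rw [sub_land, negSucc_form]
      simp [Int.testBit, Nat.testBit_ldiff]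
      cases m.testBit i <;> cases n.testBit i <;> simp
  | negSucc m =>
    cases b with
    | ofNat n =>
      simp only [pos_ofNat, npos_negSucc, if_true, if_false, toNat_negpart, toNat_ofNat']
      rw [sub_land, negSucc_form]
      simp [Int.testBit, Nat.testBit_ldiff]
    | negSucc n =>
      simp only [npos_negSucc, if_false, toNat_negpart, negSucc_form]
      simp [Int.testBit]

theorem tb_not (a : Int) (i : Nat) : (Int.not a).testBit i = !a.testBit i := by
  cases a <;> simp [Int.not, Int.testBit]

theorem tb_shr (x : Int) (k i : Nat) : (x >>> k).testBit i = x.testBit (k + i) := by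
  cases x with
  | ofNat n => rw [show (Int.ofNat n) >>> k = Int.ofNat (n >>> k) from rfl]
               simp [Int.testBit, Nat.testBit_shiftRight]
  | negSucc n => rw [show (Int.negSucc n) >>> k = Int.negSucc (n >>> k) from rfl]
                 simp [Int.testBit, Nat.testBit_shiftRight]

theorem tb_shl (x : Int) (k i : Nat) :
    (x <<< k).testBit i = (decide (k ≤ i) && x.testBit (i - k)) := by
  cases x with
  | ofNat n => rw [show (Int.ofNat n) <<< k = Int.ofNat (n <<< k) from rfl]
               simp [Int.testBit, Nat.testBit_shiftLeft]
  | negSucc n =>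
    rw [show (Int.negSucc n) <<< k = Int.negSucc ((n+1) <<< k - 1) from rfl]
    simp only [Int.testBit, Nat.shiftLeft_eq, tb_mul_pow_sub_one]
    by_cases h : k ≤ i
    · simp [h, show ¬ i < k from by omega]
    · simp [h, show i < k from by omega]

theorem tb_zero (i : Nat) : (0 : Int).testBit i = false := by
  rw [show (0:Int) = Int.ofNat 0 from rfl]; simp [Int.testBit]

theorem tb_pow (n i : Nat) : (((2 ^ n : Nat) : Int)).testBit i = decide (n = i) := by
  rw [show ((2^n : Nat) : Int) = Int.ofNat (2^n) from rfl]
  simp [Int.testBit, Nat.testBit_two_pow]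

theorem tb_mask (n i : Nat) : (((2 ^ n - 1 : Nat) : Int)).testBit i = decide (i < n) := by
  rw [show ((2^n - 1 : Nat) : Int) = Int.ofNat (2^n - 1) from rfl]
  simp [Int.testBit, Nat.testBit_two_pow_sub_one]

theorem tb_one (i : Nat) : (1 : Int).testBit i = decide ((0:Nat) = i) := by
  have := tb_pow 0 i; norm_num at this; exact this
theorem tb_128 (i : Nat) : (128 : Int).testBit i = decide ((7:Nat) = i) := by
  have := tb_pow 7 i; norm_num at this; exact this
theorem tb_255 (i : Nat) : (255 : Int).testBit i = decide (i < 8) := by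
  have := tb_mask 8 i; norm_num at this; exact this
theorem tb_31 (i : Nat) : (31 : Int).testBit i = decide (i < 5) := by
  have := tb_mask 5 i; norm_num at this; exact this

theorem low_bits_bound (K : Nat) (x : Int) (h : ∀ i, K ≤ i → x.testBit i = false) :
    0 ≤ x ∧ x < ((2 ^ K : Nat) : Int) := by
  cases x with
  | negSucc m =>
    exfalso
    have hb : m.testBit (K + m) = false :=
      Nat.testBit_lt_two_pow (lt_of_lt_of_le Nat.lt_two_pow_self (Nat.pow_le_pow_right (by norm_num) (by omega)))
    have := h (K + m) (by omega)
    simp only [Int.testBit, hb] at this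
    simp at this
  | ofNat n =>
    have he : n = n &&& (2 ^ K - 1) := by
      apply Nat.eq_of_testBit_eq
      intro i
      rw [Nat.testBit_land, Nat.testBit_two_pow_sub_one]
      by_cases hi : i < K
      · simp [hi]
      · have := h i (by omega)
        simp only [Int.testBit] at this
        simp [this]
    have hlt : n < 2 ^ K := by
      rw [he, Nat.and_two_pow_sub_one_eq_mod]
      exact Nat.mod_lt _ (by positivity)
    exact ⟨Int.natCast_nonneg n, Int.ofNat_lt.mpr hlt⟩

theorem vb_pow (x : Int) (n : Nat) :
    PySem.Int.band x ((2 ^ n : Nat) : Int) = if x.testBit n then ((2 ^ n : Nat) : Int) else 0 := by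
  apply int_ext
  intro i
  rw [tb_band, tb_pow]
  by_cases hx : x.testBit n = true
  · simp only [hx, if_true]
    rw [tb_pow]
    by_cases hn : n = i
    · subst hn; simp [hx]
    · simp [hn]
  · simp only [Bool.not_eq_true] at hx
    simp only [hx]
    by_cases hn : n = i
    · subst hn; simp [hx, tb_zero]
    · simp [hn, tb_zero]

theorem vb_1 (x : Int) : PySem.Int.band x 1 = if x.testBit 0 then 1 else 0 := by
  have := vb_pow x 0; norm_num at this; exact this
theorem vb_2 (x : Int) : PySem.Int.band x 2 = if x.testBit 1 then 2 else 0 := by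
  have := vb_pow x 1; norm_num at this; exact this
theorem vb_4 (x : Int) : PySem.Int.band x 4 = if x.testBit 2 then 4 else 0 := by
  have := vb_pow x 2; norm_num at this; exact this
theorem vb_8 (x : Int) : PySem.Int.band x 8 = if x.testBit 3 then 8 else 0 := by
  have := vb_pow x 3; norm_num at this; exact this
theorem vb_16 (x : Int) : PySem.Int.band x 16 = if x.testBit 4 then 16 else 0 := by
  have := vb_pow x 4; norm_num at this; exact this
theorem vb_32 (x : Int) : PySem.Int.band x 32 = if x.testBit 5 then 32 else 0 := by
  have := vb_pow x 5; norm_num at this; exact this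
theorem vb_64 (x : Int) : PySem.Int.band x 64 = if x.testBit 6 then 64 else 0 := by
  have := vb_pow x 6; norm_num at this; exact this
theorem vb_128 (x : Int) : PySem.Int.band x 128 = if x.testBit 7 then 128 else 0 := by
  have := vb_pow x 7; norm_num at this; exact this

theorem cond_bit (x : Int) : (PySem.Int.band x 1 != 0) = x.testBit 0 := by
  rw [vb_1]; cases h : x.testBit 0 <;> simp_all

theorem cond_bit7 (x : Int) : (PySem.Int.band x 128 != 0) = x.testBit 7 := by
  rw [vb_128]; cases h : x.testBit 7 <;> simp_all

theorem cond_w2 (x : Int) : (PySem.Int.band x 2 != 0) = x.testBit 1 := by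
  rw [vb_2]; cases h : x.testBit 1 <;> simp_all
theorem cond_w4 (x : Int) : (PySem.Int.band x 4 != 0) = x.testBit 2 := by
  rw [vb_4]; cases h : x.testBit 2 <;> simp_all
theorem cond_w8 (x : Int) : (PySem.Int.band x 8 != 0) = x.testBit 3 := by
  rw [vb_8]; cases h : x.testBit 3 <;> simp_all
theorem cond_w16 (x : Int) : (PySem.Int.band x 16 != 0) = x.testBit 4 := by
  rw [vb_16]; cases h : x.testBit 4 <;> simp_all
theorem cond_w32 (x : Int) : (PySem.Int.band x 32 != 0) = x.testBit 5 := by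
  rw [vb_32]; cases h : x.testBit 5 <;> simp_all
theorem cond_w64 (x : Int) : (PySem.Int.band x 64 != 0) = x.testBit 6 := by
  rw [vb_64]; cases h : x.testBit 6 <;> simp_all
theorem cond_w128 (x : Int) : (PySem.Int.band x 128 != 0) = x.testBit 7 := cond_bit7 x

-- bounded OR combinator

def orUpto (f : Nat → Bool) : Nat → Bool
  | 0 => f 0
  | p+1 => orUpto f p || f (p+1)

theorem orUpto_iff (f : Nat → Bool) (p : Nat) :
    orUpto f p = true ↔ ∃ q, q ≤ p ∧ f q = true := by
  induction p with
  | zero =>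
    simp only [orUpto]
    constructor
    · intro h; exact ⟨0, le_refl 0, h⟩
    · rintro ⟨q, hq, h⟩; rw [Nat.le_zero] at hq; rwa [hq] at h
  | succ p ih =>
    simp only [orUpto, Bool.or_eq_true, ih]
    constructor
    · rintro (⟨q, hq, h⟩ | h)
      · exact ⟨q, by omega, h⟩
      · exact ⟨p+1, le_refl _, h⟩
    · rintro ⟨q, hq, h⟩
      rcases Nat.lt_or_ge q (p+1) with h1 | h1
      · exact Or.inl ⟨q, by omega, h⟩
      · right; rwa [show p + 1 = q from by omega]

theorem orUpto_congr {f g : Nat → Bool} (p : Nat) (h : ∀ q, q ≤ p → f q = g q) :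
    orUpto f p = orUpto g p := by
  induction p with
  | zero => exact h 0 (le_refl 0)
  | succ p ih => simp only [orUpto, ih (fun q hq => h q (by omega)), h (p+1) (le_refl _)]

theorem bool_ext {a b : Bool} (h : a = true ↔ b = true) : a = b := by
  cases a <;> cases b <;> simp_all

-- A's loop as an iterated step

def stepRes (x : Int) : Int :=
  PySem.Int.bor (if PySem.Int.band x 0x80 != 0 then 0x80 else 0) (x >>> (1 : Nat))

def stepA (st : Int × Int) : Int × Int :=
  (stepRes st.1, pv_set_flag st.2 (PySem.Int.band st.1 1 != 0) 1)

theorem foldl_const {α σ : Type} (l : List α) (f : σ → σ) (s : σ) :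
    l.foldl (fun st _ => f st) s = f^[l.length] s := by
  induction l generalizing s with
  | nil => rfl
  | cons a l ih => simp [List.foldl, ih, Function.iterate_succ_apply]

theorem loopA_eq (l : List Int) (s : Int × Int) :
    l.foldl (fun (st : Int × Int) _ =>
        let new_fl := pv_set_flag st.2 (PySem.Int.band st.1 1 != 0) 1
        let expand : Int := if PySem.Int.band st.1 0x80 != 0 then 0x80 else 0
        (PySem.Int.bor expand (st.1 >>> (1 : Nat)), new_fl)) s = stepA^[l.length] s :=
  foldl_const l stepA s

theorem len_pyRange (c : Int) (hc : 0 < c) : (PySem.List.pyRange 0 c 1).length = c.toNat := by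
  simp [PySem.List.pyRange, hc]

-- the bit profile of A's loop result

def orHi (a : Int) (m : Nat) : Bool := orUpto (fun q => decide (7 ≤ q) && a.testBit q) m

def specBit (k : Nat) (a : Int) (i : Nat) : Bool :=
  if 8 ≤ i ∨ i + k ≤ 7 then a.testBit (i + k) else orHi a (i + k)

theorem orHi_succ (a : Int) (m : Nat) :
    orHi a (m+1) = (orHi a m || (decide (7 ≤ m+1) && a.testBit (m+1))) := rfl

theorem tb_stepRes (x : Int) (i : Nat) :
    (stepRes x).testBit i = ((decide (i = 7) && x.testBit 7) || x.testBit (i+1)) := by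
  unfold stepRes
  rw [cond_bit7]
  cases hx : x.testBit 7 with
  | false =>
    rw [if_neg (by simp), tb_bor, tb_zero, tb_shr, show 1 + i = i + 1 from by omega]
    simp
  | true =>
    rw [if_pos rfl, tb_bor, tb_shr, show 1 + i = i + 1 from by omega,
        show (0x80 : Int) = 128 from rfl, tb_128]
    by_cases hi : i = 7
    · subst hi; simp
    · simp [hi, Ne.symm hi]

theorem tb_iter (k : Nat) (a : Int) (i : Nat) :
    (stepRes^[k] a).testBit i = specBit k a i := by
  induction k generalizing i with
  | zero =>
    rw [Function.iterate_zero_apply]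
    unfold specBit
    rw [if_pos (by omega), Nat.add_zero]
  | succ k ih =>
    rw [Function.iterate_succ_apply', tb_stepRes, ih, ih]
    unfold specBit
    by_cases hi : i = 7
    · subst hi
      cases k with
      | zero => simp [orHi, orUpto]
      | succ k' =>
        rw [if_neg (by omega), if_pos (by omega), if_neg (by omega)]
        rw [show 7 + (k'+1+1) = (7 + (k'+1)) + 1 from by omega, orHi_succ,
            show 8 + (k'+1) = 7 + (k'+1) + 1 from by omega]
        simp [show (7:Nat) ≤ 7 + (k'+1) + 1 from by omega]
    · rw [decide_eq_false hi, Bool.false_and, Bool.false_or]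
      rcases Nat.lt_or_ge i 8 with h8 | h8
      · by_cases hle : i + 1 + k ≤ 7
        · rw [if_pos (Or.inr (by omega)), if_pos (Or.inr (by omega)),
              show i + 1 + k = i + (k+1) from by omega]
        · rw [if_neg (by omega), if_neg (by omega),
              show i + 1 + k = i + (k+1) from by omega]
      · rw [if_pos (Or.inl (by omega)), if_pos (Or.inl (by omega)),
            show i + 1 + k = i + (k+1) from by omega]

-- flag bookkeeping of A's loop

theorem setflag1_absorb (fl : Int) (b b' : Bool) :
    pv_set_flag (pv_set_flag fl b 1) b' 1 = pv_set_flag fl b' 1 := by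
  apply int_ext
  intro i
  unfold pv_set_flag
  cases b <;> cases b' <;>
    simp only [if_true, if_false, Bool.false_eq_true, tb_bor, tb_band, tb_not, tb_one] <;>
    by_cases hi : (0:Nat) = i <;> simp [hi]

theorem iterA (k : Nat) (a : Int) (fl : Int) :
    stepA^[k+1] (a, fl) =
      (stepRes^[k+1] a, pv_set_flag fl (PySem.Int.band (stepRes^[k] a) 1 != 0) 1) := by
  induction k generalizing fl with
  | zero => rfl
  | succ k ih =>
    rw [Function.iterate_succ_apply' (n := k+1), ih, stepA,
        Function.iterate_succ_apply' (n := k+1)]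
    exact congrArg _ (setflag1_absorb fl _ _)

-- B's prefix-OR smear

def win (t : Int) (w : Nat) (p : Nat) : Bool :=
  orUpto (fun q => decide (p < q + w) && t.testBit q) p

theorem win_one (t : Int) (p : Nat) : win t 1 p = t.testBit p := by
  apply bool_ext
  rw [win, orUpto_iff]
  constructor
  · rintro ⟨q, hq, h⟩
    rw [Bool.and_eq_true, decide_eq_true_iff] at h
    obtain ⟨h1, h2⟩ := h
    rwa [show p = q from by omega]
  · intro h; exact ⟨p, le_refl p, by simp [h]⟩

theorem win_double (t : Int) (w : Nat) (x : Int)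
    (h : ∀ p, x.testBit p = win t w p) (p : Nat) :
    (PySem.Int.bor x (x <<< w)).testBit p = win t (w + w) p := by
  apply bool_ext
  rw [tb_bor, tb_shl, h p, h (p - w)]
  simp only [win, Bool.or_eq_true, Bool.and_eq_true, decide_eq_true_iff, orUpto_iff]
  constructor
  · rintro (⟨q, hq, hlt, htb⟩ | ⟨hwp, q, hq, hlt, htb⟩) <;>
      exact ⟨q, by omega, by omega, htb⟩
  · rintro ⟨q, hq, hlt, htb⟩
    rcases Nat.lt_or_ge p (q + w) with hc | hc
    · exact Or.inl ⟨q, hq, hc, htb⟩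
    · exact Or.inr ⟨by omega, q, by omega, by omega, htb⟩

def smear (t : Int) : Int :=
  let s := t
  let s := PySem.Int.bor s (s <<< (1 : Nat))
  let s := PySem.Int.bor s (s <<< (2 : Nat))
  let s := PySem.Int.bor s (s <<< (4 : Nat))
  let s := PySem.Int.bor s (s <<< (8 : Nat))
  PySem.Int.bor s (s <<< (16 : Nat))

theorem tb_smear (t : Int) (p : Nat) : (smear t).testBit p = win t 32 p := by
  have h1 := win_double t 1 t (fun p => (win_one t p).symm)
  have h2 := win_double t 2 _ h1
  have h4 := win_double t 4 _ h2
  have h8 := win_double t 8 _ h4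
  have h16 := win_double t 16 _ h8
  exact h16 p

theorem win_full (t : Int) (p : Nat) (hp : p ≤ 31) :
    win t 32 p = orUpto (fun q => t.testBit q) p := by
  apply orUpto_congr
  intro q hq
  simp [show p < q + 32 from by omega]

theorem orHi_shift (a : Int) (m : Nat) (hm : 7 ≤ m) :
    orHi a m = orUpto (fun q => (a >>> (7:Nat)).testBit q) (m - 7) := by
  apply bool_ext
  rw [orHi, orUpto_iff, orUpto_iff]
  constructor
  · rintro ⟨q, hq, hh⟩
    rw [Bool.and_eq_true, decide_eq_true_iff] at hh
    refine ⟨q - 7, by omega, ?_⟩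
    rw [tb_shr, show 7 + (q - 7) = q from by omega]
    exact hh.2
  · rintro ⟨r, hr, hh⟩
    rw [tb_shr] at hh
    exact ⟨7 + r, by omega, by simp [hh]⟩

-- B's closed-form result equals A's loop result

theorem res_eq (a : Int) (n : Nat) (h1 : 1 ≤ n) (h2 : n ≤ 31) :
    PySem.Int.bor (a >>> n)
        (PySem.Int.band ((smear (a >>> (7:Nat)) <<< (7 : Nat)) >>> n) 0xff) =
      stepRes^[n] a := by
  apply int_ext
  intro i
  rw [tb_bor, tb_band, tb_shr, tb_shr, tb_shl, tb_iter,
      show (0xff : Int) = 255 from rfl, tb_255]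
  unfold specBit
  rcases Nat.lt_or_ge i 8 with h8 | h8
  · rw [decide_eq_true h8, Bool.and_true]
    by_cases hcase : i + n ≤ 7
    · rw [if_pos (by omega)]
      rcases Nat.lt_or_ge (n + i) 7 with h7 | h7
      · rw [decide_eq_false (by omega), Bool.false_and, Bool.or_false,
            show n + i = i + n from by omega]
      · have h7' : n + i = 7 := by omega
        rw [decide_eq_true (by omega), Bool.true_and, tb_smear,
            win_full _ _ (by omega), show n + i - 7 = 0 from by omega]
        apply bool_ext
        rw [Bool.or_eq_true, orUpto_iff]
        constructor
        · rintro (h | ⟨q, hq, hh⟩)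
          · rwa [show i + n = n + i from by omega]
          · rw [Nat.le_zero] at hq; subst hq
            rw [tb_shr] at hh
            rwa [show i + n = 7 + 0 from by omega]
        · intro h
          exact Or.inl (by rwa [show n + i = i + n from by omega])
    · rw [if_neg (by omega), decide_eq_true (by omega), Bool.true_and, tb_smear,
          win_full _ _ (by omega), orHi_shift a (i + n) (by omega),
          show i + n - 7 = n + i - 7 from by omega]
      apply bool_ext
      rw [Bool.or_eq_true, orUpto_iff]
      constructor
      · rintro (h | hh)
        · exact ⟨n + i - 7, le_refl _, by rwa [tb_shr, show 7 + (n + i - 7) = n + i from by omega]⟩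
        · exact hh
      · intro h; exact Or.inr h
  · rw [decide_eq_false (show ¬ i < 8 from by omega), Bool.and_false, Bool.or_false,
        if_pos (by omega), show n + i = i + n from by omega]

-- parity: A's popcount loop vs B's bit_count on the low byte

theorem tb_byte (v : Int) (i : Nat) :
    (PySem.Int.band v 255).testBit i = (v.testBit i && decide (i < 8)) := by
  rw [tb_band, tb_255]

theorem parity_eq (v : Int) :
    pv_must_set_pf v = (PySem.Int.bitCount (PySem.Int.band v 0xff) % 2 == 0) := by
  obtain ⟨hm0, hmlt⟩ := low_bits_bound 8 (PySem.Int.band v 255)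
    (fun i hi => by rw [tb_byte]; simp [show ¬ i < 8 from by omega])
  obtain ⟨p, hp⟩ : ∃ p : Nat, PySem.Int.band v 255 = (p : Int) :=
    ⟨(PySem.Int.band v 255).toNat, (Int.toNat_of_nonneg hm0).symm⟩
  have hplt : p < 256 := by
    rw [hp] at hmlt; norm_num at hmlt; exact_mod_cast hmlt
  have hbit : ∀ i, i < 8 → v.testBit i = p.testBit i := by
    intro i hi
    have := tb_byte v i
    rw [hp] at this
    simp only [decide_eq_true hi, Bool.and_true] at this
    rw [← this]
    rfl
  unfold pv_must_set_pf
  rw [show PySem.List.pyRange 0 8 1 = [0,1,2,3,4,5,6,7] from by decide]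
  simp only [List.foldl]
  rw [show ((1:Int) <<< ((Int.toNat (0:Int) : Nat) : Int)) = 1 from by decide,
      show ((1:Int) <<< ((Int.toNat (1:Int) : Nat) : Int)) = 2 from by decide,
      show ((1:Int) <<< ((Int.toNat (2:Int) : Nat) : Int)) = 4 from by decide,
      show ((1:Int) <<< ((Int.toNat (3:Int) : Nat) : Int)) = 8 from by decide,
      show ((1:Int) <<< ((Int.toNat (4:Int) : Nat) : Int)) = 16 from by decide,
      show ((1:Int) <<< ((Int.toNat (5:Int) : Nat) : Int)) = 32 from by decide,
      show ((1:Int) <<< ((Int.toNat (6:Int) : Nat) : Int)) = 64 from by decide,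
      show ((1:Int) <<< ((Int.toNat (7:Int) : Nat) : Int)) = 128 from by decide,
      cond_bit, cond_w2, cond_w4, cond_w8, cond_w16, cond_w32, cond_w64, cond_w128,
      hbit 0 (by omega), hbit 1 (by omega), hbit 2 (by omega), hbit 3 (by omega),
      hbit 4 (by omega), hbit 5 (by omega), hbit 6 (by omega), hbit 7 (by omega),
      show (0xff : Int) = 255 from rfl, hp]
  interval_cases p <;> decide

-- evaluating the two ports on the main branch

theorem myA_eval (a cnt fl : Int) (h : PySem.Int.band cnt 0x1f ≠ 0)
    (hpos : 0 < PySem.Int.band cnt 0x1f) :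
    my_sar a cnt fl =
      (stepRes^[(PySem.Int.band cnt 0x1f).toNat] a,
       pv_set_flags_pzs (stepRes^[(PySem.Int.band cnt 0x1f).toNat] a)
         (pv_set_flag fl
           (PySem.Int.band (stepRes^[(PySem.Int.band cnt 0x1f).toNat - 1] a) 1 != 0) 1)) := by
  have hfalse : (PySem.Int.band cnt 0x1f == 0) = false := beq_eq_false_iff_ne.mpr h
  simp only [my_sar, hfalse, Bool.false_eq_true, if_false, loopA_eq]
  rw [len_pyRange _ hpos]
  obtain ⟨k, hk⟩ : ∃ k, (PySem.Int.band cnt 0x1f).toNat = k + 1 :=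
    ⟨(PySem.Int.band cnt 0x1f).toNat - 1, by omega⟩
  rw [hk, show PySem.Int.band fl (Int.not 1) = pv_set_flag fl false 1 from rfl, iterA,
      setflag1_absorb, show k + 1 - 1 = k from by omega]

theorem myB_eval (a cnt fl : Int) (h : PySem.Int.band cnt 0x1f ≠ 0) :
    my_sar_alt a cnt fl =
      (PySem.Int.bor (a >>> (PySem.Int.band cnt 0x1f).toNat)
         (PySem.Int.band ((smear (a >>> (7:Nat)) <<< (7:Nat)) >>> (PySem.Int.band cnt 0x1f).toNat) 0xff),
       pv_set_flags_pzs
         (PySem.Int.bor (a >>> (PySem.Int.band cnt 0x1f).toNat)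
           (PySem.Int.band ((smear (a >>> (7:Nat)) <<< (7:Nat)) >>> (PySem.Int.band cnt 0x1f).toNat) 0xff))
         (pv_set_flag fl
           ((if PySem.Int.band cnt 0x1f - 1 < 8 then
               PySem.Int.band (a >>> (PySem.Int.band cnt 0x1f - 1).toNat) 1
             else
               PySem.Int.band (smear (a >>> (7:Nat)) >>> (PySem.Int.band cnt 0x1f - 1 - 7).toNat) 1) != 0) 1)) := by
  have hfalse : (PySem.Int.band cnt 0x1f == 0) = false := beq_eq_false_iff_ne.mpr h
  simp only [my_sar_alt, hfalse, Bool.false_eq_true, if_false]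
  unfold pv_set_flags_pzs pv_set_flag pv_must_set_zf pv_must_set_sf
  rw [parity_eq]
  rfl

theorem cf_eq (a : Int) (c : Int) (h1 : 0 < c) (h2 : c < 32) :
    ((if c - 1 < 8 then PySem.Int.band (a >>> (c - 1).toNat) 1
      else PySem.Int.band (smear (a >>> (7:Nat)) >>> (c - 1 - 7).toNat) 1) != 0)
    = (PySem.Int.band (stepRes^[c.toNat - 1] a) 1 != 0) := by
  rw [cond_bit]
  by_cases hlt : c - 1 < 8
  · rw [if_pos hlt, cond_bit, tb_shr, tb_iter]
    unfold specBit
    rw [if_pos (by omega), show (c-1).toNat + 0 = 0 + (c.toNat - 1) from by omega]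
  · rw [if_neg hlt, cond_bit, tb_shr, tb_iter]
    unfold specBit
    rw [if_neg (by omega), Nat.add_zero, tb_smear, win_full _ _ (by omega),
        Nat.zero_add, orHi_shift a (c.toNat - 1) (by omega),
        show (c - 1 - 7).toNat = c.toNat - 1 - 7 from by omega]

-- ===== VERDICT (by name: the statement is the Claim_ definition above) =====
theorem my_sar_spec : Claim_equal_my_sar := by
  unfold Claim_equal_my_sar Spec_my_sar
  intro a cnt fl _
  by_cases hc0 : PySem.Int.band cnt 0x1f = 0
  · simp [my_sar, my_sar_alt, hc0]
  · have hb := low_bits_bound 5 (PySem.Int.band cnt 0x1f) (fun i hi => by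
      rw [tb_band, tb_31]
      simp [show ¬ i < 5 from by omega])
    norm_num at hb
    obtain ⟨hc1, hc2⟩ := hb
    rw [myA_eval a cnt fl hc0 (by omega), myB_eval a cnt fl hc0,
        res_eq a (PySem.Int.band cnt 0x1f).toNat (by omega) (by omega),
        cf_eq a (PySem.Int.band cnt 0x1f) (by omega) (by omega)]
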